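-- pv_equiv track=rewrite | github.com/seventhridge/mat2110 | 19-MagicSquares.py | areAllNumbersUnique
-- ===== SOURCE A (Python) =====
-- def areAllNumbersUnique(ms):
--     """ determine if all numbers in the matrix
--     are unique by counting them and then going
--     through all the counts to see if any of
--     them have a count bigger than 1.
--     Matrix ms is a list of lists  """
--     try:
--         counters = {} # set of empty counters
--         for rowN in range(len(ms)):
--             for colN in range(len(ms[rowN])):
--                 numAtCell = ms[rowN][colN]
--                 currCount = counters.get( numAtCell, 0)
--                 currCount = currCount + 1
--                 counters[numAtCell] = currCount
--                 # note we could just do: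
--                 # counters[numAtCell] =
--                 #     counters.get( ms[rowN, colN], 0) + 1
--         for key,val in counters.items():
--             if val > 1:
--                 return False
--         return True
--     except:
--         return False
-- ===== SOURCE B (Python) =====
-- def areAllNumbersUnique(ms):
--     seen = set()
--     for row in ms:
--         for v in row:
--             if v in seen:
--                 return False
--             seen.add(v)
--     return True
-- ===== Notes on version B (the rewrite author's own statement) =====
-- stated objective: simpler
-- what changed: Replaced the build-a-full-frequency-dict-then-scan-all-counts two-pass algorithm with a single traversal keeping a 'seen' set that returns False at the first repeated value.
import Mathlib
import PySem

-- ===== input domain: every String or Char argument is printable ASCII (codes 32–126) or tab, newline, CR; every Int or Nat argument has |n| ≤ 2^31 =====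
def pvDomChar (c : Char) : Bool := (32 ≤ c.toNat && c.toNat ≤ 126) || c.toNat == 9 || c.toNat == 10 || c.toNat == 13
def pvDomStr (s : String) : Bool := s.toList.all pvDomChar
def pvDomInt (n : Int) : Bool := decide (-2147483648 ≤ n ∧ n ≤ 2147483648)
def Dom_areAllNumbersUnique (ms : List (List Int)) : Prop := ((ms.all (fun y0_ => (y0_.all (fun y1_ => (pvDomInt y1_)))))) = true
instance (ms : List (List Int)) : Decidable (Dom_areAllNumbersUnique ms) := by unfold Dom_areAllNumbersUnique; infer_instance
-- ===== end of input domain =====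

-- B replaces A's count-everything-then-scan-the-counters dict with a single 'seen'-set pass
-- that returns False at the first repeated value (objective: simpler; same return value).

-- ===== PORT A =====
-- the second loop 'for key,val in counters.items(): if val > 1: return False' / 'return True'
def pvScanCounts : List (Int × Int) → Bool
  | [] => true
  | (_, v) :: rest => if v > 1 then false else pvScanCounts rest

def areAllNumbersUnique (ms : List (List Int)) : Bool :=
  let counters : PySem.Dict Int Int :=
    (PySem.List.pyRange 0 (ms.length : Int) 1).foldl
      (fun cs rowN =>
        (PySem.List.pyRange 0 ((PySem.List.pyGetD ms rowN []).length : Int) 1).foldl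
          (fun cs2 colN =>
            let numAtCell := PySem.List.pyGetD (PySem.List.pyGetD ms rowN []) colN 0
            let currCount := cs2.getD numAtCell 0 + 1
            cs2.insert numAtCell currCount)
          cs)
      PySem.Dict.empty
  pvScanCounts counters.items

-- ===== PORT B =====
-- inner loop: walk one row, threading 'seen'; none = the Python 'return False'
def pvAltRow (seen : PySem.Set Int) : List Int → Option (PySem.Set Int)
  | [] => some seen
  | v :: rest =>
      if PySem.Set.contains seen v then none
      else pvAltRow (PySem.Set.add seen v) rest

def pvAltRows (seen : PySem.Set Int) : List (List Int) → Bool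
  | [] => true
  | row :: rest =>
      match pvAltRow seen row with
      | none => false
      | some s => pvAltRows s rest

def areAllNumbersUnique_alt (ms : List (List Int)) : Bool :=
  pvAltRows PySem.Set.empty ms

-- ===== PRECONDITION & SPEC =====
def Spec_areAllNumbersUnique (ms : List (List Int)) (out : Bool) : Prop := out = areAllNumbersUnique_alt ms
instance (ms : List (List Int)) (out : Bool) : Decidable (Spec_areAllNumbersUnique ms out) := by unfold Spec_areAllNumbersUnique; infer_instance

-- ===== CLAIM (what is proved, stated in full; the proofs are below) =====
def Claim_equal_areAllNumbersUnique : Prop := ∀ (ms : List (List Int)), Dom_areAllNumbersUnique ms → Spec_areAllNumbersUnique ms (areAllNumbersUnique ms)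

-- ===== LEMMAS AND PROOFS =====

-- A's counters-scan loop is a negated 'any'
theorem pvScanCounts_eq_any (l : List (Int × Int)) :
    pvScanCounts l = !l.any (fun p => decide (p.2 > 1)) := by
  induction l with
  | nil => rfl
  | cons p rest ih =>
      obtain ⟨k, v⟩ := p
      by_cases h : v > 1 <;> simp [pvScanCounts, h, ih]

-- A returns true exactly when the flattened matrix has no duplicates
theorem areAllNumbersUnique_eq_true_iff (ms : List (List Int)) :
    areAllNumbersUnique ms = true ↔ ms.flatten.Nodup := by
  unfold areAllNumbersUnique
  dsimp only
  have h1 := PySem.List.foldl_pyRange_zero_pyGetD' ms []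
      (fun cs (row : List Int) =>
        (PySem.List.pyRange 0 (row.length : Int) 1).foldl
          (fun cs2 colN =>
            cs2.insert (PySem.List.pyGetD row colN 0)
              (cs2.getD (PySem.List.pyGetD row colN 0) 0 + 1)) cs)
      (PySem.Dict.empty : PySem.Dict Int Int)
  beta_reduce at h1
  rw [h1]
  rw [PySem.List.foldl_congr_mem _ _ (fun cs row =>
        row.foldl (fun cs2 x => cs2.insert x (cs2.getD x 0 + 1)) cs) _
        (by
          intro acc row _
          exact PySem.List.foldl_pyRange_zero_pyGetD' row 0
            (fun cs2 (x : Int) => cs2.insert x (cs2.getD x 0 + 1)) acc)]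
  rw [← List.foldl_flatten]
  rw [PySem.Dict.foldl_insert_getD_add_one_eq_counter]
  rw [pvScanCounts_eq_any, PySem.Dict.items_counter]
  rw [List.any_map]
  simp only [Bool.not_eq_eq_eq_not, Bool.not_true, List.any_eq_false, Function.comp]
  constructor
  · intro h
    rw [List.nodup_iff_count_le_one]
    intro a
    by_cases ha : a ∈ ms.flatten
    · have := h a (by rw [PySem.Set.mem_ofList]; exact ha)
      simp at this
      omega
    · simp [List.count_eq_zero_of_not_mem ha]
  · intro h x hx
    rw [List.nodup_iff_count_le_one] at h
    have := h x
    simp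
    omega

-- B's inner loop succeeds iff the row is duplicate-free and disjoint from 'seen'
theorem pvAltRow_isSome_iff (xs : List Int) (seen : PySem.Set Int) :
    (pvAltRow seen xs).isSome = true ↔ xs.Nodup ∧ ∀ x ∈ xs, x ∉ seen := by
  induction xs generalizing seen with
  | nil => simp [pvAltRow]
  | cons v rest ih =>
      by_cases hv : v ∈ seen
      · rw [pvAltRow, if_pos ((PySem.Set.contains_iff seen v).mpr hv)]
        simp only [Option.isSome_none, Bool.false_eq_true, false_iff, not_and]
        intro _ hall
        exact hall v (List.mem_cons_self) hv
      · rw [pvAltRow, if_neg (fun h => hv ((PySem.Set.contains_iff seen v).mp h)), ih]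
        simp only [PySem.Set.mem_add, List.nodup_cons, List.mem_cons, forall_eq_or_imp, not_or]
        constructor
        · rintro ⟨hnd, hall⟩
          exact ⟨⟨fun hm => (hall v hm).2 rfl, hnd⟩, hv, fun x hx => (hall x hx).1⟩
        · rintro ⟨⟨hvr, hnd⟩, _, hall⟩
          exact ⟨hnd, fun x hx => ⟨hall x hx, fun he => hvr (he ▸ hx)⟩⟩

-- B on appended flattened input
theorem pvAltRow_append (xs ys : List Int) (seen : PySem.Set Int) :
    pvAltRow seen (xs ++ ys) = (pvAltRow seen xs).bind (fun s => pvAltRow s ys) := by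
  induction xs generalizing seen with
  | nil => simp [pvAltRow]
  | cons v rest ih =>
      simp only [List.cons_append, pvAltRow]
      split <;> simp [ih]

-- the row-by-row loop equals one walk of the flattened matrix
theorem pvAltRows_eq_flat (ms : List (List Int)) (seen : PySem.Set Int) :
    pvAltRows seen ms = (pvAltRow seen ms.flatten).isSome := by
  induction ms generalizing seen with
  | nil => simp [pvAltRows, pvAltRow]
  | cons row rest ih =>
      simp only [pvAltRows, List.flatten_cons, pvAltRow_append]
      cases h : pvAltRow seen row with
      | none => simp
      | some s => simp [ih]

theorem areAllNumbersUnique_alt_eq_true_iff (ms : List (List Int)) :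
    areAllNumbersUnique_alt ms = true ↔ ms.flatten.Nodup := by
  unfold areAllNumbersUnique_alt
  rw [pvAltRows_eq_flat, pvAltRow_isSome_iff]
  simp [PySem.Set.empty]

-- ===== VERDICT (by name: the statement is the Claim_ definition above) =====
theorem areAllNumbersUnique_spec : Claim_equal_areAllNumbersUnique := by
  intro ms _
  unfold Spec_areAllNumbersUnique
  rw [Bool.eq_iff_iff, areAllNumbersUnique_eq_true_iff, areAllNumbersUnique_alt_eq_true_iff]
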